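-- pv_equiv track=rewrite | github.com/rp25/Old-Class-Work | Cryptology/RSA1.py | mIPT
-- ===== SOURCE A (Python) =====
-- def mIPT(IPT):
--
--     mStr = ""
--     #Checks to see if character is an letter or number
--     for i in range(0, len(IPT)):
--         if((ord(IPT[i]) >= 48 and ord(IPT[i]) <= 57) or
--             (ord(IPT[i]) >= 65 and ord(IPT[i]) <= 90) or
--             (ord(IPT[i]) >= 97 and ord(IPT[i]) <= 122)
--             or (ord(IPT[i]) == 32)):
--             #Adds letters and converts them to uppercase
--             mStr = mStr + IPT[i].upper()
--
--     return mStr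
-- ===== SOURCE B (Python) =====
-- import re
--
-- def mIPT(IPT):
--     # delete every char not in the class [0-9A-Za-z ], then uppercase (all ASCII)
--     return re.sub(r'[^0-9A-Za-z ]', '', IPT).upper()
-- ===== Notes on version B (the rewrite author's own statement) =====
-- stated objective: faster
-- what changed: Replaces the index loop with per-character ord-range tests and incremental string concatenation by a single regex substitution deleting characters outside [0-9A-Za-z ] followed by one str.upper() call.
import Mathlib
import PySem

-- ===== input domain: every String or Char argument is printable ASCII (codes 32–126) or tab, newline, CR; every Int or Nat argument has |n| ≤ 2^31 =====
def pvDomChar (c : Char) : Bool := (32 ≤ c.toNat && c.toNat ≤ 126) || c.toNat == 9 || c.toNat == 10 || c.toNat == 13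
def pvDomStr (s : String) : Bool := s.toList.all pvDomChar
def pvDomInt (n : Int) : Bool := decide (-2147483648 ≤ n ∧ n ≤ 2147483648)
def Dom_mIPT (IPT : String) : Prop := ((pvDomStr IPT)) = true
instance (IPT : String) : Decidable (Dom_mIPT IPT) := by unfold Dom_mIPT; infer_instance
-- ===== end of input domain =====

-- B replaces A's index loop (ord-range tests + string concatenation) by a regex-style
-- filter of the allowed character class followed by one upper() pass (idiomatic).


-- ===== PORT A =====
-- for i in range(0, len(IPT)): if ord tests: mStr = mStr + IPT[i].upper()
def mIPT (IPT : String) : String :=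
  String.ofList ((PySem.List.pyRange 0 (PySem.Str.len IPT) 1).foldl
    (fun mStr i =>
      let c := PySem.List.pyGetD IPT.toList i ' '
      if (48 ≤ c.toNat ∧ c.toNat ≤ 57) ∨ (65 ≤ c.toNat ∧ c.toNat ≤ 90) ∨
         (97 ≤ c.toNat ∧ c.toNat ≤ 122) ∨ c.toNat = 32
      then mStr ++ [PySem.Chars.upperChar c] else mStr)
    [])

-- ===== PORT B =====
-- character class [0-9A-Za-z ] of the regex; re.sub deletes the complement, then .upper()
def pvAllowed (c : Char) : Bool :=
  (48 ≤ c.toNat && c.toNat ≤ 57) || (65 ≤ c.toNat && c.toNat ≤ 90) ||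
  (97 ≤ c.toNat && c.toNat ≤ 122) || decide (c.toNat = 32)

def mIPT_alt (IPT : String) : String :=
  PySem.Str.upper (String.ofList (IPT.toList.filter pvAllowed))

-- ===== PRECONDITION & SPEC =====
def Spec_mIPT (IPT : String) (out : String) : Prop := out = mIPT_alt IPT
instance (IPT : String) (out : String) : Decidable (Spec_mIPT IPT out) := by unfold Spec_mIPT; infer_instance

-- ===== CLAIM (what is proved, stated in full; the proofs are below) =====
def Claim_equal_mIPT : Prop := ∀ (IPT : String), Dom_mIPT IPT → Spec_mIPT IPT (mIPT IPT)

-- ===== LEMMAS AND PROOFS =====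
theorem mIPT_eq_filter_map (IPT : String) :
    mIPT IPT = String.ofList ((IPT.toList.filter pvAllowed).map PySem.Chars.upperChar) := by
  unfold mIPT
  rw [show PySem.Str.len IPT = PySem.List.len IPT.toList from by simp [PySem.Str.len, PySem.List.len]]
  rw [PySem.List.foldl_pyRange_zero_pyGetD IPT.toList ' '
      (f := fun mStr c =>
        if (48 ≤ c.toNat ∧ c.toNat ≤ 57) ∨ (65 ≤ c.toNat ∧ c.toNat ≤ 90) ∨
           (97 ≤ c.toNat ∧ c.toNat ≤ 122) ∨ c.toNat = 32
        then mStr ++ [PySem.Chars.upperChar c] else mStr) (init := [])]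
  rw [PySem.List.foldl_append_ite
      (p := fun c : Char => (48 ≤ c.toNat ∧ c.toNat ≤ 57) ∨ (65 ≤ c.toNat ∧ c.toNat ≤ 90) ∨
           (97 ≤ c.toNat ∧ c.toNat ≤ 122) ∨ c.toNat = 32)]
  rw [List.nil_append]
  apply congrArg String.ofList
  apply congrArg (List.map PySem.Chars.upperChar)
  apply List.filter_congr
  intro c _
  simp [pvAllowed, Bool.or_assoc]

-- ===== VERDICT (by name: the statement is the Claim_ definition above) =====
theorem mIPT_spec : Claim_equal_mIPT := by
  intro IPT _
  unfold Spec_mIPT mIPT_alt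
  rw [mIPT_eq_filter_map]
  rw [← String.toList_inj]
  simp [PySem.Chars.upper, String.toList_ofList]
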